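-- pv_equiv track=rewrite | github.com/salesforce/pomgen | src/common/code.py | _has_space_until_open_paren
-- ===== SOURCE A (Python) =====
-- def _has_space_until_open_paren(text, start_index):
--     if start_index < 0 or start_index >= len(text):
--         raise IndexError("start_index is out of bounds")
--     current_index = start_index
--     while current_index < len(text):
--         char = text[current_index]
--         if char == '(':
--             return True
--         if not char.isspace():
--             return False
--         current_index += 1
--     return False
-- ===== SOURCE B (Python) =====
-- def _has_space_until_open_paren(text, start_index):
--     if start_index < 0 or start_index >= len(text):
--         raise IndexError("start_index is out of bounds")
--     paren_at = text.find('(', start_index)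
--     if paren_at == -1:
--         return False
--     return paren_at == start_index or text[start_index:paren_at].isspace()
-- ===== Notes on version B (the rewrite author's own statement) =====
-- stated objective: alternative
-- what changed: Instead of scanning characters one by one and deciding at the first non-space, B first locates the next '(' with str.find and then verifies the gap text[start_index:paren_at] is entirely whitespace with str.isspace — a find-then-verify two-stage algorithm with no per-character loop or state.
import Mathlib
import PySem

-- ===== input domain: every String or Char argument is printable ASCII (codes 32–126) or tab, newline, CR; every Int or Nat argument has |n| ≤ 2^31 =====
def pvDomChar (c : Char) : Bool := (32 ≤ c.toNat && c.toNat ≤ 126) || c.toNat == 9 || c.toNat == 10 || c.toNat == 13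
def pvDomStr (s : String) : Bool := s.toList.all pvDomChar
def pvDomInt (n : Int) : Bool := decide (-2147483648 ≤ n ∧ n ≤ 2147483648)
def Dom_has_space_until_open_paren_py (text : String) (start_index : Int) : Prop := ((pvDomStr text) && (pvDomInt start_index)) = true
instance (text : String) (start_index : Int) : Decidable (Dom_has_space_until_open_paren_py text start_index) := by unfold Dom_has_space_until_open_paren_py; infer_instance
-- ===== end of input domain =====

-- B replaces A's first-non-space scan by a find-then-verify strategy: locate the next '(' with
-- str.find, then check the gap before it is all whitespace with str.isspace; objective: alternative.

-- ===== PORT A =====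
-- the while loop of A: look at each character from current_index on
def pvLoopA : List Char → Bool
  | [] => false
  | c :: cs =>
    if c == '(' then true
    else if !(PySem.Chars.isspace c) then false
    else pvLoopA cs

def has_space_until_open_paren_py (text : String) (start_index : Int) : Bool :=
  if start_index < 0 ∨ start_index ≥ (text.toList.length : Int) then false  -- A raises IndexError here: outside Pre_
  else pvLoopA (text.toList.drop start_index.toNat)

-- ===== PORT B =====
def has_space_until_open_paren_py_alt (text : String) (start_index : Int) : Bool :=
  if start_index < 0 ∨ start_index ≥ (text.toList.length : Int) then false  -- B raises IndexError here: outside Pre_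
  else
    let paren_at := PySem.Str.findFrom text "(" start_index none
    if paren_at == -1 then false
    else paren_at == start_index || PySem.Str.strIsspace (PySem.Str.slice text (some start_index) (some paren_at))

-- ===== PRECONDITION & SPEC =====
-- Pre_ excludes exactly the inputs where A raises IndexError (start_index out of bounds).
def Pre_has_space_until_open_paren_py (text : String) (start_index : Int) : Prop :=
  0 ≤ start_index ∧ start_index < (text.toList.length : Int)
instance (text : String) (start_index : Int) : Decidable (Pre_has_space_until_open_paren_py text start_index) := by unfold Pre_has_space_until_open_paren_py; infer_instance

def pvWitness_has_space_until_open_paren_py : String × Int := ("  (x", 0)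

def Spec_has_space_until_open_paren_py (text : String) (start_index : Int) (out : Bool) : Prop := out = has_space_until_open_paren_py_alt text start_index
instance (text : String) (start_index : Int) (out : Bool) : Decidable (Spec_has_space_until_open_paren_py text start_index out) := by unfold Spec_has_space_until_open_paren_py; infer_instance

-- ===== CLAIM (what is proved, stated in full; the proofs are below) =====
def Claim_equal_has_space_until_open_paren_py : Prop := ∀ (text : String) (start_index : Int), Dom_has_space_until_open_paren_py text start_index → Pre_has_space_until_open_paren_py text start_index → Spec_has_space_until_open_paren_py text start_index (has_space_until_open_paren_py text start_index)

-- ===== LEMMAS AND PROOFS =====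

-- a singleton list is a prefix exactly when it is the head
theorem pvSingleton_prefix_iff (a : Char) (l : List Char) : [a] <+: l ↔ l.head? = some a := by
  cases l with
  | nil => simp
  | cons c cs =>
    constructor
    · rintro ⟨t, ht⟩; simp at ht; simp [ht.1]
    · intro h; simp at h; exact ⟨cs, by simp [h]⟩

-- if '(' does not occur, A's loop returns false
theorem pvLoopA_of_not_mem (l : List Char) (h : '(' ∉ l) : pvLoopA l = false := by
  induction l with
  | nil => rfl
  | cons c cs ih =>
    have hc : (c == '(') = false := by
      simp at h; simp; exact fun e => h.1 e.symm
    by_cases hs : PySem.Chars.isspace c = true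
    · simp [pvLoopA, hc, hs]; exact ih (by simp at h; exact h.2)
    · simp [pvLoopA, hc, hs]

-- A's loop, characterized at the position n of the FIRST '(' in l
theorem pvLoopA_at_first (l : List Char) (n : Nat)
    (hp : l[n]? = some '(') (hmin : ∀ i, i < n → l[i]? ≠ some '(') :
    pvLoopA l = (decide (n = 0) || PySem.Chars.strIsspace (l.take n)) := by
  induction l generalizing n with
  | nil => simp at hp
  | cons c cs ih =>
    cases n with
    | zero =>
      simp at hp
      simp [pvLoopA, hp, PySem.Chars.strIsspace]
    | succ m =>
      have hc : (c == '(') = false := by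
        have := hmin 0 (Nat.succ_pos m)
        simp only [List.getElem?_cons_zero, ne_eq, Option.some.injEq] at this
        simpa using this
      have hp' : cs[m]? = some '(' := by simpa using hp
      have hmin' : ∀ i, i < m → cs[i]? ≠ some '(' := by
        intro i hi
        have := hmin (i + 1) (by omega)
        simpa using this
      have hlen : m < cs.length := by
        have := List.getElem?_eq_some_iff.mp hp'
        exact this.1
      by_cases hs : PySem.Chars.isspace c = true
      · have hloop : pvLoopA (c :: cs) = pvLoopA cs := by simp [pvLoopA, hc, hs]
        rw [hloop, ih m hp' hmin']
        cases m with
        | zero => simp [PySem.Chars.strIsspace, hs]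
        | succ m' =>
          have hne2 : cs.take (m' + 1) ≠ [] := by
            intro h
            have := congrArg List.length h
            simp only [List.length_take, List.length_nil] at this
            omega
          simp [PySem.Chars.strIsspace, hs, List.all_cons, hne2]
      · simp [pvLoopA, hc, hs, PySem.Chars.strIsspace, List.all_cons]

-- ===== VERDICT (by name: the statement is the Claim_ definition above) =====
theorem has_space_until_open_paren_py_spec : Claim_equal_has_space_until_open_paren_py := by
  intro text i _ hpre
  obtain ⟨h0, hlt⟩ := hpre
  unfold Spec_has_space_until_open_paren_py
  unfold has_space_until_open_paren_py has_space_until_open_paren_py_alt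
  rw [if_neg (by omega), if_neg (by omega)]
  set l := text.toList with hl
  set k := i.toNat with hk
  have hik : i = (k : Int) := (Int.toNat_of_nonneg h0).symm
  have hkle : k ≤ l.length := by omega
  set m := l.drop k with hm
  clear_value m
  clear_value k
  clear_value l
  have hfind : PySem.Str.findFrom text "(" i none =
      (if PySem.Chars.find m ['('] = -1 then -1 else (k : Int) + PySem.Chars.find m ['(']) := by
    rw [hik]
    rw [PySem.Str.findFrom_eq]
    simpa [← hl, hm] using PySem.Chars.findFrom_natCast l ['('] k hkle
  by_cases hf : PySem.Chars.find m ['('] = -1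
  · -- no '(' after k: both sides false
    have hnm : '(' ∉ m := by
      intro hmem
      obtain ⟨s, t, ht⟩ := List.append_of_mem hmem
      exact (PySem.Chars.find_eq_neg_one_iff m ['(']).mp hf ⟨s, t, by simp [ht]⟩
    rw [hfind, if_pos hf]
    simp [pvLoopA_of_not_mem m hnm]
  · have hge : 0 ≤ PySem.Chars.find m ['('] := by
      have := PySem.Chars.neg_one_le_find m ['(']
      omega
    set f := PySem.Chars.find m ['('] with hfdef
    obtain ⟨hpref, hminp⟩ := PySem.Chars.find_spec (s := m) (sub := ['(']) hge
    rw [← hfdef] at hpref hminp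
    clear_value f
    have hp : m[f.toNat]? = some '(' := by
      have := (pvSingleton_prefix_iff '(' (m.drop f.toNat)).mp hpref
      simpa [List.head?_eq_getElem?, List.getElem?_drop] using this
    have hmin : ∀ j, j < f.toNat → m[j]? ≠ some '(' := by
      intro j hj hc
      exact hminp j hj ((pvSingleton_prefix_iff '(' (m.drop j)).mpr
        (by simpa [List.head?_eq_getElem?, List.getElem?_drop] using hc))
    rw [hfind, if_neg hf]
    have hne : (((k : Int) + f) == -1) = false := by
      rw [beq_eq_false_iff_ne]
      omega
    rw [if_neg (by simpa using hne)]
    have hargN : (((k : Int)) + f).toNat - k = f.toNat := by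
      rw [Int.toNat_add (Int.natCast_nonneg k) hge, Int.toNat_natCast]
      omega
    have hslice : (PySem.Str.slice text (some i) (some ((k : Int) + f))).toList = m.take f.toNat := by
      rw [PySem.Str.toList_slice, ← hl, hik]
      simp only [PySem.Chars.slice_eq_listSlice]
      rw [PySem.List.slice_toNat l (Int.natCast_nonneg k) (add_nonneg (Int.natCast_nonneg k) hge)]
      rw [Int.toNat_natCast]
      rw [hargN, hm]
    have heq : (((k : Int) + f) == i) = decide (f.toNat = 0) := by
      rw [hik, Bool.eq_iff_iff]
      simp only [beq_iff_eq, decide_eq_true_eq, Int.toNat_eq_zero]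
      omega
    rw [pvLoopA_at_first m f.toNat hp hmin]
    have hstr : PySem.Str.strIsspace (PySem.Str.slice text (some i) (some ((k : Int) + f))) =
        PySem.Chars.strIsspace (m.take f.toNat) := by
      rw [PySem.Str.strIsspace_eq, hslice]
    rw [heq, hstr]
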